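-- pv_equiv track=rewrite | github.com/doanhuynh049/ComputerVision | exercise11.py | detect_memory_usage_periods
-- ===== SOURCE A (Python) =====
-- def detect_memory_usage_periods(memory_usage, threshold, interval, during_time):
--     periods = []
--     start_index = None
--
--     for i, usage in enumerate(memory_usage):
--         if usage >= threshold:
--             if start_index is None:
--                 start_index = i
--         else:
--             if start_index is not None:
--                 end_index = i - 1
--                 if (end_index - start_index + 1) * interval >= during_time:
--                     periods.append((start_index, end_index))
--                 start_index = None
--
--     if start_index is not None:
--         end_index = len(memory_usage) - 1
--         if (end_index - start_index + 1) * interval >= during_time: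
--             periods.append((start_index, end_index))
--
--     return periods
-- ===== SOURCE B (Python) =====
-- def detect_memory_usage_periods(memory_usage, threshold, interval, during_time):
--     hot = [u >= threshold for u in memory_usage]
--     starts = [i for i, (prev, cur) in enumerate(zip([False] + hot, hot)) if cur and not prev]
--     ends = [i for i, (cur, nxt) in enumerate(zip(hot, hot[1:] + [False])) if cur and not nxt]
--     return [(s, e) for s, e in zip(starts, ends)
--             if (e - s + 1) * interval >= during_time]
-- ===== Notes on version B (the rewrite author's own statement) =====
-- stated objective: alternative
-- what changed: Replaces A's start_index state machine with its duplicated post-loop flush by three declarative passes: edge-detect run starts and run ends via shifted zips over the hot-mask, zip the k-th start with the k-th end, and filter pairs by duration.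
import Mathlib
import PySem

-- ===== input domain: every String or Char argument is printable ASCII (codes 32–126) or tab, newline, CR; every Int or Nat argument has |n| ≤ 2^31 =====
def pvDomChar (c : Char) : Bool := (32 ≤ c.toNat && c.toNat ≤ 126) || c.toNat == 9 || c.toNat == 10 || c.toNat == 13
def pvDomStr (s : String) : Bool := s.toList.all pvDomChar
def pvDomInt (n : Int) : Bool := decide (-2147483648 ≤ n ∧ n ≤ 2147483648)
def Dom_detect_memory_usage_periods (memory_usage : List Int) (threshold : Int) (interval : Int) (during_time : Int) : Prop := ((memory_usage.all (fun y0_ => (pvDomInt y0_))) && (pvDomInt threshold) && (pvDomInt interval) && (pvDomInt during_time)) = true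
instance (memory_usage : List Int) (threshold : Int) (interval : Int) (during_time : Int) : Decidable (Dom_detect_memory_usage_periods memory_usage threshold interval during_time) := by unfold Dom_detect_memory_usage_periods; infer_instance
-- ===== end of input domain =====

-- B replaces A's start_index state machine (with its duplicated post-loop flush) by three
-- declarative passes: edge-detect run starts and run ends with shifted zips, pair them up,
-- filter by duration (alternative decomposition; same O(n) cost).

-- ===== PORT A =====
-- A's for-loop as the obvious structural recursion over enumerate(memory_usage),
-- carrying the loop state (periods, start_index).
def pvLoopA (threshold interval during_time : Int) :
    List (Int × Int) → List (Int × Int) × Option Int → List (Int × Int) × Option Int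
  | [], s => s
  | (i, usage) :: rest, (periods, start_index) =>
    if usage ≥ threshold then
      pvLoopA threshold interval during_time rest
        (periods, match start_index with | none => some i | some si => some si)
    else
      match start_index with
      | none => pvLoopA threshold interval during_time rest (periods, none)
      | some si =>
        let end_index := i - 1
        pvLoopA threshold interval during_time rest
          ((if (end_index - si + 1) * interval ≥ during_time then periods ++ [(si, end_index)] else periods), none)

def detect_memory_usage_periods (memory_usage : List Int) (threshold : Int) (interval : Int) (during_time : Int) : List (Int × Int) :=
  let s := pvLoopA threshold interval during_time (PySem.List.enumerate memory_usage) ([], none)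
  match s.2 with
  | none => s.1
  | some si =>
    let end_index := (memory_usage.length : Int) - 1
    if (end_index - si + 1) * interval ≥ during_time then s.1 ++ [(si, end_index)] else s.1

-- ===== PORT B =====
-- hot = [u >= threshold for u in memory_usage]
-- starts = [i for i,(prev,cur) in enumerate(zip([False]+hot, hot)) if cur and not prev]
-- ends   = [i for i,(cur,nxt) in enumerate(zip(hot, hot[1:]+[False])) if cur and not nxt]
-- return [(s,e) for s,e in zip(starts,ends) if (e-s+1)*interval >= during_time]
def detect_memory_usage_periods_alt (memory_usage : List Int) (threshold : Int) (interval : Int) (during_time : Int) : List (Int × Int) :=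
  let hot := memory_usage.map (fun u => decide (u ≥ threshold))
  let starts := (PySem.List.enumerate ((false :: hot).zip hot)).filterMap
      (fun x => if x.2.2 && !x.2.1 then some x.1 else none)
  let ends := (PySem.List.enumerate (hot.zip (PySem.List.slice hot (some 1) none ++ [false]))).filterMap
      (fun x => if x.2.1 && !x.2.2 then some x.1 else none)
  (starts.zip ends).filter (fun p => decide ((p.2 - p.1 + 1) * interval ≥ during_time))

-- ===== PRECONDITION & SPEC =====
def Spec_detect_memory_usage_periods (memory_usage : List Int) (threshold : Int) (interval : Int) (during_time : Int) (out : List (Int × Int)) : Prop := out = detect_memory_usage_periods_alt memory_usage threshold interval during_time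
instance (memory_usage : List Int) (threshold : Int) (interval : Int) (during_time : Int) (out : List (Int × Int)) : Decidable (Spec_detect_memory_usage_periods memory_usage threshold interval during_time out) := by unfold Spec_detect_memory_usage_periods; infer_instance

-- ===== CLAIM (what is proved, stated in full; the proofs are below) =====
def Claim_equal_detect_memory_usage_periods : Prop := ∀ (memory_usage : List Int) (threshold : Int) (interval : Int) (during_time : Int), Dom_detect_memory_usage_periods memory_usage threshold interval during_time → Spec_detect_memory_usage_periods memory_usage threshold interval during_time (detect_memory_usage_periods memory_usage threshold interval during_time)

-- ===== LEMMAS AND PROOFS =====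

def pvHot (t u : Int) : Bool := decide (u ≥ t)

-- run starts of the suffix, given whether the previous element was hot
def pvS (t : Int) : List Int → Int → Bool → List Int
  | [], _, _ => []
  | u :: r, j, p => (if pvHot t u && !p then [j] else []) ++ pvS t r (j + 1) (pvHot t u)

def pvHead (t : Int) : List Int → Bool
  | [] => false
  | u :: _ => pvHot t u

-- run ends of the suffix (lookahead on the next element)
def pvE (t : Int) : List Int → Int → List Int
  | [], _ => []
  | u :: r, j => (if pvHot t u && !(pvHead t r) then [j] else []) ++ pvE t r (j + 1)

-- the period contributed by a run [si..e], if long enough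
def pvClose (iv dt si e : Int) : List (Int × Int) :=
  if (e - si + 1) * iv ≥ dt then [(si, e)] else []

-- zip starts with ends and keep the long-enough ones (B's final comprehension)
def pvZF (iv dt : Int) (s e : List Int) : List (Int × Int) :=
  (s.zip e).filter (fun p => decide ((p.2 - p.1 + 1) * iv ≥ dt))

-- A's post-loop flush at total index bound n
def pvFinish (iv dt n : Int) : List (Int × Int) × Option Int → List (Int × Int)
  | (periods, none) => periods
  | (periods, some si) => periods ++ pvClose iv dt si (n - 1)

theorem pvZF_nil (iv dt : Int) (s : List Int) : pvZF iv dt s [] = [] := by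
  simp [pvZF]

theorem pvZF_cons (iv dt a b : Int) (s e : List Int) :
    pvZF iv dt (a :: s) (b :: e) = pvClose iv dt a b ++ pvZF iv dt s e := by
  simp only [pvZF, pvClose, List.zip_cons_cons, List.filter_cons]
  split <;> simp_all

-- B's starts comprehension equals the structural recursion pvS
theorem pvStartsB (t : Int) (mu : List Int) : ∀ (j : Int) (p : Bool),
    (PySem.List.enumerate ((p :: mu.map (pvHot t)).zip (mu.map (pvHot t))) j).filterMap
      (fun x => if x.2.2 && !x.2.1 then some x.1 else none) = pvS t mu j p := by
  induction mu with
  | nil => intro j p; simp [pvS, PySem.List.enumerate_nil]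
  | cons u r ih =>
    intro j p
    simp only [List.map_cons, List.zip_cons_cons, PySem.List.enumerate_cons, List.filterMap_cons]
    rw [ih (j + 1) (pvHot t u)]
    simp only [pvS]
    by_cases h : pvHot t u = true ∧ p = false <;> simp [h]

-- B's ends comprehension equals the structural recursion pvE
theorem pvEndsB (t : Int) (mu : List Int) : ∀ (j : Int),
    (PySem.List.enumerate ((mu.map (pvHot t)).zip ((mu.map (pvHot t)).tail ++ [false])) j).filterMap
      (fun x => if x.2.1 && !x.2.2 then some x.1 else none) = pvE t mu j := by
  induction mu with
  | nil => intro j; simp [pvE, PySem.List.enumerate_nil]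
  | cons u r ih =>
    intro j
    cases r with
    | nil =>
      by_cases h : pvHot t u = true <;>
        simp [pvE, pvHead, PySem.List.enumerate_cons, PySem.List.enumerate_nil,
          h]
    | cons v r2 =>
      simp only [List.map_cons, List.tail_cons, List.cons_append, List.zip_cons_cons,
        PySem.List.enumerate_cons, List.filterMap_cons]
      have hrec := ih (j + 1)
      simp only [List.map_cons, List.tail_cons] at hrec
      rw [hrec]
      simp only [pvE, pvHead]
      by_cases h : pvHot t u = true ∧ pvHot t v = false <;> simp [h]

-- the main invariant: closed and open loop states at once
theorem pvMain (t iv dt : Int) (mu : List Int) :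
    (∀ (j : Int) (acc : List (Int × Int)),
      pvFinish iv dt (j + mu.length) (pvLoopA t iv dt (PySem.List.enumerate mu j) (acc, none))
        = acc ++ pvZF iv dt (pvS t mu j false) (pvE t mu j))
    ∧ (∀ (j si : Int) (acc : List (Int × Int)),
      pvFinish iv dt (j + mu.length) (pvLoopA t iv dt (PySem.List.enumerate mu j) (acc, some si))
        = acc ++ pvZF iv dt (si :: pvS t mu j true)
            ((if !(pvHead t mu) then [j - 1] else []) ++ pvE t mu j)) := by
  induction mu with
  | nil =>
    constructor
    · intro j acc
      simp [PySem.List.enumerate_nil, pvLoopA, pvFinish, pvS, pvE, pvZF]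
    · intro j si acc
      simp [PySem.List.enumerate_nil, pvLoopA, pvFinish, pvS, pvE, pvHead,
        pvZF_cons, pvZF_nil]
  | cons u rest ih =>
    obtain ⟨ihC, ihO⟩ := ih
    have hlen : ∀ j : Int, j + (((u :: rest).length : Nat) : Int) = (j + 1) + (rest.length : Int) := by
      intro j; simp [List.length_cons]; ring
    constructor
    · intro j acc
      rw [PySem.List.enumerate_cons, hlen]
      by_cases hu : u ≥ t
      · have hub : pvHot t u = true := by simp [pvHot, hu]
        rw [show pvLoopA t iv dt ((j, u) :: PySem.List.enumerate rest (j + 1)) (acc, none)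
              = pvLoopA t iv dt (PySem.List.enumerate rest (j + 1)) (acc, some j) from by
            simp [pvLoopA, hu]]
        rw [ihO (j + 1) j acc]
        simp [pvS, pvE, hub, add_sub_cancel_right]
      · have hub : pvHot t u = false := by simp [pvHot, hu]
        rw [show pvLoopA t iv dt ((j, u) :: PySem.List.enumerate rest (j + 1)) (acc, none)
              = pvLoopA t iv dt (PySem.List.enumerate rest (j + 1)) (acc, none) from by
            simp [pvLoopA, hu]]
        rw [ihC (j + 1) acc]
        simp [pvS, pvE, hub]
    · intro j si acc
      rw [PySem.List.enumerate_cons, hlen]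
      by_cases hu : u ≥ t
      · have hub : pvHot t u = true := by simp [pvHot, hu]
        rw [show pvLoopA t iv dt ((j, u) :: PySem.List.enumerate rest (j + 1)) (acc, some si)
              = pvLoopA t iv dt (PySem.List.enumerate rest (j + 1)) (acc, some si) from by
            simp [pvLoopA, hu]]
        rw [ihO (j + 1) si acc]
        simp [pvS, pvE, pvHead, hub, add_sub_cancel_right]
      · have hub : pvHot t u = false := by simp [pvHot, hu]
        rw [show pvLoopA t iv dt ((j, u) :: PySem.List.enumerate rest (j + 1)) (acc, some si)
              = pvLoopA t iv dt (PySem.List.enumerate rest (j + 1))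
                  ((if ((j - 1) - si + 1) * iv ≥ dt then acc ++ [(si, j - 1)] else acc), none) from by
            simp [pvLoopA, hu]]
        rw [ihC (j + 1) _]
        have hacc : (if ((j - 1) - si + 1) * iv ≥ dt then acc ++ [(si, j - 1)] else acc)
            = acc ++ pvClose iv dt si (j - 1) := by
          unfold pvClose; split <;> simp
        rw [hacc, List.append_assoc]
        simp [pvS, pvE, pvHead, hub, pvZF_cons]

-- the port of A, rewritten through pvFinish
theorem portA_eq_finish (mu : List Int) (t iv dt : Int) :
    detect_memory_usage_periods mu t iv dt
      = pvFinish iv dt (mu.length : Int) (pvLoopA t iv dt (PySem.List.enumerate mu) ([], none)) := by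
  unfold detect_memory_usage_periods
  rcases pvLoopA t iv dt (PySem.List.enumerate mu) ([], none) with ⟨per, _ | si⟩
  · rfl
  · simp only [pvFinish, pvClose]
    split <;> simp

-- ===== VERDICT (by name: the statement is the Claim_ definition above) =====
theorem detect_memory_usage_periods_spec : Claim_equal_detect_memory_usage_periods := by
  unfold Claim_equal_detect_memory_usage_periods
  intro mu t iv dt _
  unfold Spec_detect_memory_usage_periods detect_memory_usage_periods_alt
  rw [portA_eq_finish]
  have h := (pvMain t iv dt mu).1 0 []
  rw [zero_add] at h
  rw [h, List.nil_append]
  simp only [PySem.List.slice_from_one]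
  have hmap : mu.map (fun u => decide (u ≥ t)) = mu.map (pvHot t) := rfl
  rw [hmap, pvStartsB t mu 0 false, pvEndsB t mu 0]
  rfl
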